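-- pv_equiv track=rewrite | github.com/bellinileonardo/rotomax_app | main.py | expand_multi_addresses
-- ===== SOURCE A (Python) =====
-- def expand_multi_addresses(raw_list: list[str]) -> list[str]:
--     """
--     Separa endereços que contêm múltiplos números no final.
--     Ex: 'Rua Manoel Vilar, 22, 103' -> ['Rua Manoel Vilar, 22', 'Rua Manoel Vilar, 103']
--     """
--     expanded = []
--     for addr in raw_list:
--         parts = [p.strip() for p in addr.split(",")]
--
--         # Identifica partes numéricas no final da string
--         digit_parts = []
--         i = len(parts) - 1
--         while i > 0:
--             if parts[i].isdigit():
--                 digit_parts.append(parts[i])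
--                 i -= 1
--             else:
--                 break
--
--         # Se houver 2 ou mais números e houver texto antes deles
--         if len(digit_parts) >= 2 and i >= 0:
--             base = ", ".join(parts[:i+1])
--             for d in reversed(digit_parts):
--                 expanded.append(f"{base}, {d}")
--         else:
--             expanded.append(addr)
--     return expanded
-- ===== SOURCE B (Python) =====
-- def _expand_one(addr: str) -> list[str]:
--     parts = [p.strip() for p in addr.split(",")]
--     # single forward pass with a run/flush accumulator: digit parts collect in `run`,
--     # any non-digit part flushes the pending run back into `base`
--     base, run = [parts[0]], []
--     for p in parts[1:]:
--         if p.isdigit():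
--             run.append(p)
--         else:
--             base.extend(run)
--             base.append(p)
--             run = []
--     if len(run) >= 2:
--         joined = ", ".join(base)
--         return [f"{joined}, {d}" for d in run]
--     return [addr]
--
--
-- def expand_multi_addresses(raw_list: list[str]) -> list[str]:
--     out = []
--     for addr in raw_list:
--         out.extend(_expand_one(addr))
--     return out
-- ===== Notes on version B (the rewrite author's own statement) =====
-- stated objective: alternative
-- what changed: Replaces A's backward index scan that accumulates trailing digit parts (then re-reverses them) with a single forward run/flush accumulator pass: digit parts collect into a pending run and any non-digit part flushes the run into the base list, so no indices, no slicing and no reversal are used; the vacuous i>=0 guard disappears.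
import Mathlib
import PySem

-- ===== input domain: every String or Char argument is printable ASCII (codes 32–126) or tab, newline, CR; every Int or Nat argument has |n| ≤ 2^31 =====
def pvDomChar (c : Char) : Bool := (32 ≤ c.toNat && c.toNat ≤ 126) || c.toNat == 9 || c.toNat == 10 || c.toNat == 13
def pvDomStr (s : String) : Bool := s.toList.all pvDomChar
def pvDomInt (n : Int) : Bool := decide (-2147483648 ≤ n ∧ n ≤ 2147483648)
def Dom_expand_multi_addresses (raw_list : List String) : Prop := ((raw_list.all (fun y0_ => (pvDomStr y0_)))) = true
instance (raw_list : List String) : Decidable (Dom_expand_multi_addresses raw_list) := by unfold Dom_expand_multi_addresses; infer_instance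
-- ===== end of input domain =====

-- B replaces A's backward index scan over the parts by a single forward run/flush
-- accumulator pass (pending digit run flushed into the base by any non-digit part);
-- a structural alternative, same cost.

-- ===== PORT A =====
-- the 'while i > 0' backward scan: returns (digit_parts, final i); parts[i] is in range whenever read
def aScan (parts : List String) : Nat → List String × Nat
  | 0 => ([], 0)
  | i + 1 =>
    if PySem.Str.strIsdigit (parts.getD (i + 1) "") then
      let r := aScan parts i
      (parts.getD (i + 1) "" :: r.1, r.2)
    else ([], i + 1)

def aStep (expanded : List String) (addr : String) : List String :=
  let parts := ((PySem.Str.split? addr ",").getD []).map PySem.Str.strip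
  let r := aScan parts (parts.length - 1)
  if 2 ≤ r.1.length ∧ (0 : Int) ≤ (r.2 : Int) then
    let base := PySem.Str.join ", " (parts.take (r.2 + 1))
    r.1.reverse.foldl (fun e d => e ++ [base ++ ", " ++ d]) expanded
  else expanded ++ [addr]

def expand_multi_addresses (raw_list : List String) : List String :=
  raw_list.foldl aStep []

-- ===== PORT B =====
-- one step of the run/flush accumulator: state = (base, pending digit run)
def bStep (st : List String × List String) (p : String) : List String × List String :=
  if PySem.Str.strIsdigit p then (st.1, st.2 ++ [p])
  else (st.1 ++ st.2 ++ [p], [])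

def bOne (addr : String) : List String :=
  let parts := ((PySem.Str.split? addr ",").getD []).map PySem.Str.strip
  match parts with
  | [] => [addr]  -- unreachable: split always returns a nonempty list
  | p0 :: rest =>
    let st := rest.foldl bStep ([p0], [])
    if 2 ≤ st.2.length then
      let joined := PySem.Str.join ", " st.1
      st.2.map (fun d => joined ++ ", " ++ d)
    else [addr]

def expand_multi_addresses_alt (raw_list : List String) : List String :=
  raw_list.foldl (fun out addr => out ++ bOne addr) []

-- ===== PRECONDITION & SPEC =====
def Spec_expand_multi_addresses (raw_list : List String) (out : List String) : Prop := out = expand_multi_addresses_alt raw_list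
instance (raw_list : List String) (out : List String) : Decidable (Spec_expand_multi_addresses raw_list out) := by unfold Spec_expand_multi_addresses; infer_instance

-- ===== CLAIM (what is proved, stated in full; the proofs are below) =====
def Claim_equal_expand_multi_addresses : Prop := ∀ (raw_list : List String), Dom_expand_multi_addresses raw_list → Spec_expand_multi_addresses raw_list (expand_multi_addresses raw_list)

-- ===== LEMMAS AND PROOFS =====

-- index of the last non-digit part in positions 1..i (0 if none): common characterisation
def lastND (parts : List String) : Nat → Nat
  | 0 => 0
  | i + 1 => if PySem.Str.strIsdigit (parts.getD (i + 1) "") then lastND parts i else i + 1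

theorem lastND_le (parts : List String) (i : Nat) : lastND parts i ≤ i := by
  induction i with
  | zero => simp [lastND]
  | succ i ih => simp only [lastND]; split <;> omega

theorem aScan_eq (parts : List String) (i : Nat) :
    aScan parts i = (((parts.take (i + 1)).drop (lastND parts i + 1)).reverse, lastND parts i) := by
  induction i with
  | zero => simp [aScan, lastND]
  | succ i ih =>
    by_cases h : PySem.Str.strIsdigit (parts.getD (i + 1) "") = true
    · have hlt : i + 1 < parts.length := by
        by_contra hge
        rw [List.getD_eq_default _ _ (by omega)] at h
        exact absurd h (by decide)
      have hget : parts.getD (i + 1) "" = parts[i + 1] := List.getD_eq_getElem _ _ hlt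
      have htake : parts.take (i + 2) = parts.take (i + 1) ++ [parts[i + 1]] := by
        rw [List.take_add_one]; simp [List.getElem?_eq_getElem hlt]
      simp only [aScan, lastND, h, if_pos, ih]
      have hj : lastND parts i ≤ i := lastND_le parts i
      rw [show i + 1 + 1 = i + 2 from rfl, htake,
          List.drop_append_of_le_length (by simp [List.length_take]; omega)]
      simp [List.getElem?_eq_getElem hlt]
    · simp only [aScan, lastND, h]
      simp

-- the run/flush fold over the first i elements of rest lands exactly at the
-- base/run split given by lastND on parts = p0 :: rest
theorem bFold_eq (p0 : String) (rest : List String) (i : Nat) (hi : i ≤ rest.length) :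
    (rest.take i).foldl bStep ([p0], [])
      = (((p0 :: rest).take (lastND (p0 :: rest) i + 1)),
         (((p0 :: rest).take (i + 1)).drop (lastND (p0 :: rest) i + 1))) := by
  induction i with
  | zero => simp [lastND]
  | succ i ih =>
    have hilt : i < rest.length := by omega
    have htake : rest.take (i + 1) = rest.take i ++ [rest[i]] := by
      rw [List.take_add_one]; simp [List.getElem?_eq_getElem hilt]
    have hget : (p0 :: rest).getD (i + 1) "" = rest[i] := by
      simp [List.getD, List.getElem?_eq_getElem hilt]
    have hj := lastND_le (p0 :: rest) i
    have htakeP : (p0 :: rest).take (i + 2) = (p0 :: rest).take (i + 1) ++ [rest[i]] := by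
      rw [List.take_add_one]
      simp [List.getElem?_cons_succ, List.getElem?_eq_getElem hilt]
    rw [htake, List.foldl_append, ih (by omega)]
    simp only [List.foldl_cons, List.foldl_nil, bStep, lastND, hget]
    by_cases h : PySem.Str.strIsdigit rest[i] = true
    · simp only [h, if_pos, Prod.mk.injEq]
      refine ⟨trivial, ?_⟩
      rw [htakeP, List.drop_append_of_le_length (by simp [List.length_take]; omega)]
    · simp only [h, Bool.false_eq_true, if_false, Prod.mk.injEq]
      refine ⟨?_, ?_⟩
      · have h1 : (p0 :: rest).take (lastND (p0 :: rest) i + 1)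
            = ((p0 :: rest).take (i + 1)).take (lastND (p0 :: rest) i + 1) := by
          rw [List.take_take, min_eq_left (by omega)]
        rw [htakeP, h1, List.take_append_drop]
      · rw [List.drop_eq_nil_of_le (by simp [List.length_take])]

theorem aStep_eq (expanded : List String) (addr : String) :
    aStep expanded addr = expanded ++ bOne addr := by
  simp only [aStep, bOne, aScan_eq]
  set parts := ((PySem.Str.split? addr ",").getD []).map PySem.Str.strip with hparts
  match hp : parts with
  | [] =>
    simp [lastND]
  | p0 :: rest =>
    have hlen : (p0 :: rest).length - 1 = rest.length := by simp
    rw [hlen]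
    have hb := bFold_eq p0 rest rest.length le_rfl
    rw [List.take_length] at hb
    have htake : (p0 :: rest).take (rest.length + 1) = p0 :: rest := by
      apply List.take_of_length_le; simp
    rw [htake] at hb ⊢
    set j := lastND (p0 :: rest) rest.length with hj
    simp only [hb]
    by_cases hc : 2 ≤ (((p0 :: rest).drop (j + 1)).reverse).length
    · rw [if_pos ⟨hc, by positivity⟩, if_pos (by simpa using hc)]
      rw [PySem.List.foldl_append_singleton_eq_map, List.reverse_reverse]
    · rw [if_neg (fun hco => hc hco.1), if_neg (by simpa using hc)]

-- ===== VERDICT (by name: the statement is the Claim_ definition above) =====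
theorem expand_multi_addresses_spec : Claim_equal_expand_multi_addresses := by
  intro raw_list _
  unfold Spec_expand_multi_addresses expand_multi_addresses expand_multi_addresses_alt
  apply PySem.List.foldl_congr_mem
  intro acc x _
  exact aStep_eq acc x
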